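-- pv_equiv track=rewrite | github.com/Nat-sourc/EjerciciosAnalisis | GaussJordanContadorDeOperaciones.py | numero_total
-- ===== SOURCE A (Python) =====
-- def numero_total(n):
--     total_operaciones=1
--     for i in range(n):
--         for j in range(n):
--             if j!=i:
--                 for k in range(i,n+1):
--                     total_operaciones+=1
--     return(total_operaciones)
-- ===== SOURCE B (Python) =====
-- def numero_total(n):
--     # Closed form: for each of the n values of i, there are n-1 admissible j,
--     # and the innermost loop runs n+1-i times; sum_{i=0}^{n-1}(n+1-i) = (n+1)(n+2)//2 - 1.
--     if n <= 0:
--         return 1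
--     return 1 + (n - 1) * ((n + 1) * (n + 2) // 2 - 1)
-- ===== Notes on version B (the rewrite author's own statement) =====
-- stated objective: faster
-- what changed: Replaced the triple nested counting loop by a closed-form arithmetic formula 1+(n-1)*((n+1)(n+2)//2-1).
import Mathlib
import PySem

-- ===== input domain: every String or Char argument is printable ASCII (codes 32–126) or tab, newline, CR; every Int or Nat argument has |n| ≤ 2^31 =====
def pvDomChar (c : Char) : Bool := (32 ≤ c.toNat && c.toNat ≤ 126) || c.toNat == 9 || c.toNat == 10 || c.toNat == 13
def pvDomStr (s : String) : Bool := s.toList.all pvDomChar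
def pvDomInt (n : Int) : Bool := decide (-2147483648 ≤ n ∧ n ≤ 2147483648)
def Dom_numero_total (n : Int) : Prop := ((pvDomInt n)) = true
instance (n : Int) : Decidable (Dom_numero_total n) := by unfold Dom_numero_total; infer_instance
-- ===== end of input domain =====

-- B replaces A's triple counting loop by a closed-form arithmetic formula.

-- ===== PORT A =====
def numero_total (n : Int) : Int :=
  (PySem.List.pyRange 0 n 1).foldl (fun tot i =>
    (PySem.List.pyRange 0 n 1).foldl (fun tot2 j =>
      if j ≠ i then
        (PySem.List.pyRange i (n + 1) 1).foldl (fun t _ => t + 1) tot2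
      else tot2) tot) 1

-- ===== PORT B =====
def numero_total_alt (n : Int) : Int :=
  if n ≤ 0 then 1
  else 1 + (n - 1) * (PySem.Int.floordiv ((n + 1) * (n + 2)) 2 - 1)

-- ===== PRECONDITION & SPEC =====
def Spec_numero_total (n : Int) (out : Int) : Prop := out = numero_total_alt n
instance (n : Int) (out : Int) : Decidable (Spec_numero_total n out) := by unfold Spec_numero_total; infer_instance

-- ===== CLAIM (what is proved, stated in full; the proofs are below) =====
def Claim_equal_numero_total : Prop := ∀ (n : Int), Dom_numero_total n → Spec_numero_total n (numero_total n)

-- ===== LEMMAS AND PROOFS =====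

-- the innermost loop adds the length of its range
theorem pv_inner (i b tot : Int) :
    (PySem.List.pyRange i b 1).foldl (fun t _ => t + 1) tot
      = tot + ((b - i).toNat : Int) := by
  rw [PySem.List.foldl_add (g := fun _ => (1 : Int))]
  simp [PySem.List.length_pyRange_one]

-- Σ over l of (if j ≠ i then C else 0) = countP (· ≠ i) * C
theorem pv_sum_if (i C : Int) (l : List Int) :
    (l.map (fun j => if j ≠ i then C else 0)).sum
      = (l.countP (fun j => decide (j ≠ i)) : Int) * C := by
  induction l with
  | nil => simp
  | cons a l ih =>
      by_cases h : a = i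
      · have hpa : (decide (a ≠ i)) = false := by simp [h]
        rw [List.map_cons, List.sum_cons, List.countP_cons_of_neg (by simp [h]),
          if_neg (by simp [h]), zero_add, ih]
      · have hpa : (decide (a ≠ i)) = true := by simp [h]
        rw [List.map_cons, List.sum_cons, List.countP_cons_of_pos (by simp [h]),
          if_pos h, ih]
        push_cast
        ring

-- countP (· ≠ i) + count i = length
theorem pv_count_split (l : List Int) (i : Int) :
    l.countP (fun j => decide (j ≠ i)) + l.count i = l.length := by
  rw [List.count, add_comm]
  rw [List.length_eq_countP_add_countP (p := fun x => x == i) (l := l)]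
  congr 1
  apply List.countP_congr
  intro x _
  simp only [ne_eq, beq_iff_eq, decide_not]

-- 2 * Σ_{k<m} (c - k) = m * (2c - m + 1)
theorem pv_sum_shift (m : Nat) (c : Int) :
    2 * ((List.range m).map (fun k : Nat => c - (k : Int))).sum = m * (2 * c - m + 1) := by
  induction m with
  | zero => simp
  | succ m ih =>
      rw [List.range_succ, List.map_append, List.sum_append]
      push_cast
      simp only [List.map_cons, List.map_nil, List.sum_cons, List.sum_nil]
      push_cast at ih
      linarith [ih, sq_nonneg ((m : Int))]

-- the middle loop, for 0 ≤ i < n, adds (n-1)*(n+1-i)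
theorem pv_middle (n i tot : Int) (hi0 : 0 ≤ i) (hin : i < n) :
    (PySem.List.pyRange 0 n 1).foldl (fun tot2 j =>
      if j ≠ i then
        (PySem.List.pyRange i (n + 1) 1).foldl (fun t _ => t + 1) tot2
      else tot2) tot
      = tot + (n - 1) * (n + 1 - i) := by
  have hc : ((n + 1 - i).toNat : Int) = n + 1 - i := by omega
  have h1 : (PySem.List.pyRange 0 n 1).foldl (fun tot2 j =>
      if j ≠ i then
        (PySem.List.pyRange i (n + 1) 1).foldl (fun t _ => t + 1) tot2
      else tot2) tot
      = (PySem.List.pyRange 0 n 1).foldl (fun tot2 j =>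
          tot2 + (if j ≠ i then n + 1 - i else 0)) tot := by
    apply PySem.List.foldl_congr_mem
    intro acc x _
    by_cases h : x = i <;> simp [h, pv_inner, hc]
  rw [h1, PySem.List.foldl_add (g := fun j => if j ≠ i then n + 1 - i else 0), pv_sum_if]
  have hmem : i ∈ PySem.List.pyRange 0 n 1 := by
    rw [PySem.List.mem_pyRange_one]; omega
  have hnodup := PySem.List.nodup_pyRange_one (a := 0) (b := n)
  have hcount : (PySem.List.pyRange 0 n 1).count i = 1 :=
    List.count_eq_one_of_mem hnodup hmem
  have hlen : (PySem.List.pyRange 0 n 1).length = n.toNat := by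
    simpa using PySem.List.length_pyRange_one (a := 0) (b := n)
  have hsplit := pv_count_split (PySem.List.pyRange 0 n 1) i
  have hcp : (PySem.List.pyRange 0 n 1).countP (fun j => decide (j ≠ i)) = n.toNat - 1 := by
    omega
  rw [hcp]
  have hcast : ((n.toNat - 1 : Nat) : Int) = n - 1 := by omega
  rw [hcast]

theorem numero_total_eq_alt (n : Int) : numero_total n = numero_total_alt n := by
  by_cases hn : n ≤ 0
  · simp [numero_total, numero_total_alt, hn, PySem.List.pyRange_one_eq_nil]
  · push_neg at hn
    unfold numero_total numero_total_alt
    rw [if_neg (by omega)]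
    have h1 : (PySem.List.pyRange 0 n 1).foldl (fun tot i =>
        (PySem.List.pyRange 0 n 1).foldl (fun tot2 j =>
          if j ≠ i then
            (PySem.List.pyRange i (n + 1) 1).foldl (fun t _ => t + 1) tot2
          else tot2) tot) 1
        = (PySem.List.pyRange 0 n 1).foldl (fun tot i => tot + (n - 1) * (n + 1 - i)) 1 := by
      apply PySem.List.foldl_congr_mem
      intro acc x hx
      rw [PySem.List.mem_pyRange_one] at hx
      exact pv_middle n x acc hx.1 hx.2
    rw [h1, PySem.List.foldl_add (g := fun i => (n - 1) * (n + 1 - i))]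
    congr 1
    -- Σ_{i ∈ range(n)} (n-1)(n+1-i)  =  (n-1) * ((n+1)(n+2)//2 - 1)
    have hfd : 2 * PySem.Int.floordiv ((n + 1) * (n + 2)) 2 = (n + 1) * (n + 2) := by
      rw [PySem.Int.floordiv_eq_ediv_of_pos (by norm_num)]
      have hev : Even ((n + 1) * (n + 2)) := by
        have h0 := Int.even_mul_succ_self (n + 1)
        have h2 : (n + 1) * (n + 1 + 1) = (n + 1) * (n + 2) := by ring
        rwa [h2] at h0
      exact Int.mul_ediv_cancel' hev.two_dvd
    have hsum2 : ((PySem.List.pyRange 0 n 1).map (fun i => (n - 1) * (n + 1 - i))).sum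
        = ((List.range n.toNat).map (fun k : Nat => (n + 1 - (k : Int)) * (n - 1))).sum := by
      rw [PySem.List.pyRange_one, List.map_map, Int.sub_zero]
      congr 1
      apply List.map_congr_left
      intro k _
      simp only [Function.comp_apply, zero_add]
      ring
    rw [hsum2]
    have hmul : ∀ l : List Nat,
        (l.map (fun k : Nat => (n + 1 - (k : Int)) * (n - 1))).sum
          = (l.map (fun k : Nat => n + 1 - (k : Int))).sum * (n - 1) := by
      intro l
      induction l with
      | nil => simp
      | cons a l ih => simp only [List.map_cons, List.sum_cons, ih]; ring
    rw [hmul]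
    have hS := pv_sum_shift n.toNat (n + 1)
    have hnn : ((n.toNat : Int)) = n := by omega
    rw [hnn] at hS
    apply mul_left_cancel₀ (a := (2 : Int)) (by norm_num)
    calc 2 * (((List.range n.toNat).map (fun k : Nat => n + 1 - (k : Int))).sum * (n - 1))
        = (2 * ((List.range n.toNat).map (fun k : Nat => n + 1 - (k : Int))).sum) * (n - 1) := by
          ring
      _ = (n * (2 * (n + 1) - n + 1)) * (n - 1) := by rw [hS]
      _ = (n - 1) * ((n + 1) * (n + 2) - 2) := by ring
      _ = (n - 1) * (2 * PySem.Int.floordiv ((n + 1) * (n + 2)) 2 - 2) := by rw [hfd]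
      _ = 2 * ((n - 1) * (PySem.Int.floordiv ((n + 1) * (n + 2)) 2 - 1)) := by ring

-- ===== VERDICT (by name: the statement is the Claim_ definition above) =====
theorem numero_total_spec : Claim_equal_numero_total := by
  intro n _
  exact numero_total_eq_alt n
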